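-- pv_equiv track=rewrite | github.com/piotrhelm/NESTFUL | data_v2/executable_functions/py_code_file_334.py | group_by_parity
-- ===== SOURCE A (Python) =====
-- from typing import List
--
-- def group_by_parity(nums: List[int]) -> tuple:
--
--     """Groups a list of integers by parity.
--
--
--
--     Args:
--
--         nums: A list of integers.
--
--
--
--     Returns:
--
--         A tuple containing two lists: one with all the even integers, the other with all the odd integers.
--
--         The elements are sorted within their respective lists.
--
--     """
--
--     even, odd = [], []
--
--     for num in nums:
--
--         if num % 2 == 0:
--
--             even.append(num)
--
--         else:
--
--             odd.append(num)
--
--     return sorted(even), sorted(odd)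
-- ===== SOURCE B (Python) =====
-- def group_by_parity(nums):
--     s = sorted(nums)
--     return [x for x in s if x % 2 == 0], [x for x in s if x % 2 != 0]
-- ===== Notes on version B (the rewrite author's own statement) =====
-- stated objective: alternative
-- what changed: B sorts the whole list once up front and then produces each group by an independent filter comprehension over the sorted list, instead of A's accumulator loop that appends into two lists followed by two separate sorts; filtering a sorted list is sorted, so the results coincide.
import Mathlib
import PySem

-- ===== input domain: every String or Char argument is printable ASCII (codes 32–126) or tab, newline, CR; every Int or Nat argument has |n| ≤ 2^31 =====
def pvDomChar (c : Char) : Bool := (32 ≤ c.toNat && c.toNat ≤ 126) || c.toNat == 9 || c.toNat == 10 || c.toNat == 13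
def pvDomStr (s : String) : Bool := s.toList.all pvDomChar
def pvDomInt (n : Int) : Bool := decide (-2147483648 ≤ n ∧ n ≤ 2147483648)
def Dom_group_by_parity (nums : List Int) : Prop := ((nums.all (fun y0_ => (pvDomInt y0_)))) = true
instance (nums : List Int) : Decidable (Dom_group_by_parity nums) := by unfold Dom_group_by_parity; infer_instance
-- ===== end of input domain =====

-- B sorts once up front and builds each group by filtering the sorted list; A loops with two accumulators and sorts each group afterwards.
-- ===== PORT A =====
def group_by_parity (nums : List Int) : List Int × List Int :=
  let eo := nums.foldl (fun (acc : List Int × List Int) num =>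
    if PySem.Int.mod num 2 == 0 then (acc.1 ++ [num], acc.2) else (acc.1, acc.2 ++ [num])) ([], [])
  (PySem.List.sorted eo.1 (fun x => x) false, PySem.List.sorted eo.2 (fun x => x) false)

-- ===== PORT B =====
def group_by_parity_alt (nums : List Int) : List Int × List Int :=
  let s := PySem.List.sorted nums (fun x => x) false
  (s.filter (fun x => PySem.Int.mod x 2 == 0), s.filter (fun x => !(PySem.Int.mod x 2 == 0)))

-- ===== PRECONDITION & SPEC =====
def Spec_group_by_parity (nums : List Int) (out : List Int × List Int) : Prop := out = group_by_parity_alt nums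
instance (nums : List Int) (out : List Int × List Int) : Decidable (Spec_group_by_parity nums out) := by unfold Spec_group_by_parity; infer_instance

-- ===== CLAIM (what is proved, stated in full; the proofs are below) =====
def Claim_equal_group_by_parity : Prop := ∀ (nums : List Int), Dom_group_by_parity nums → Spec_group_by_parity nums (group_by_parity nums)

-- ===== LEMMAS AND PROOFS =====
-- A's accumulator loop computes the two parity filters of the input
theorem partition_foldl (xs : List Int) (e o : List Int) :
    xs.foldl (fun (acc : List Int × List Int) num =>
      if PySem.Int.mod num 2 == 0 then (acc.1 ++ [num], acc.2) else (acc.1, acc.2 ++ [num])) (e, o)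
    = (e ++ xs.filter (fun n => PySem.Int.mod n 2 == 0),
       o ++ xs.filter (fun n => !(PySem.Int.mod n 2 == 0))) := by
  induction xs generalizing e o with
  | nil => simp
  | cons x xs ih =>
    rw [List.foldl_cons]
    by_cases h : (PySem.Int.mod x 2 == 0) = true
    · rw [if_pos h, ih, List.filter_cons, List.filter_cons, h]
      simp
    · rw [if_neg h, ih, List.filter_cons, List.filter_cons]
      simp only [Bool.not_eq_true] at h
      rw [h]
      simp

-- sorting then filtering = filtering then sorting
theorem sorted_filter_comm (p : Int → Bool) (xs : List Int) :
    PySem.List.sorted (xs.filter p) (fun x => x) false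
    = (PySem.List.sorted xs (fun x => x) false).filter p := by
  apply PySem.List.sorted_id_eq_of_perm_of_pairwise
  · exact (PySem.List.sorted_perm xs (fun x => x) false).filter p
  · exact (PySem.List.sorted_pairwise xs (fun x => x)).filter _

-- ===== VERDICT (by name: the statement is the Claim_ definition above) =====
theorem group_by_parity_spec : Claim_equal_group_by_parity := by
  intro nums _
  show group_by_parity nums = group_by_parity_alt nums
  simp only [group_by_parity, group_by_parity_alt, partition_foldl, List.nil_append,
    sorted_filter_comm]
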